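-- pv_equiv track=rewrite | github.com/cofa-ai/kuzma_help | group_by.py | get_equals_objects_idexes
-- ===== SOURCE A (Python) =====
-- import itertools
--
-- def get_equals_objects_idexes(objects):
--     equal_indexes = []
--     for o in objects:
--         indexes = [i for i,v in enumerate(objects) if v==o]  # Получаю индексы равных списков в списке
--         equal_indexes.append(indexes)
--
--     equal_indexes = [l for l in equal_indexes if len(l) > 1]  # Удаляю списки длинной меньше 1
--
--     equal_indexes.sort()                                                     #
--     equal_indexes = list(num for num,_ in itertools.groupby(equal_indexes))  # Удаляю дубликаты списков в списке
--     return equal_indexes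
-- ===== SOURCE B (Python) =====
-- def get_equals_objects_idexes(objects):
--     groups = {}
--     for i, v in enumerate(objects):
--         groups.setdefault(v, []).append(i)
--     return sorted(g for g in groups.values() if len(g) > 1)
-- ===== Notes on version B (the rewrite author's own statement) =====
-- stated objective: faster
-- what changed: One-pass dict grouping of indexes by value replaces the per-element quadratic rescan; the duplicate-group dedup disappears because the dict holds each value's group once, and one final sort replaces sort+groupby.
import Mathlib
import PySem

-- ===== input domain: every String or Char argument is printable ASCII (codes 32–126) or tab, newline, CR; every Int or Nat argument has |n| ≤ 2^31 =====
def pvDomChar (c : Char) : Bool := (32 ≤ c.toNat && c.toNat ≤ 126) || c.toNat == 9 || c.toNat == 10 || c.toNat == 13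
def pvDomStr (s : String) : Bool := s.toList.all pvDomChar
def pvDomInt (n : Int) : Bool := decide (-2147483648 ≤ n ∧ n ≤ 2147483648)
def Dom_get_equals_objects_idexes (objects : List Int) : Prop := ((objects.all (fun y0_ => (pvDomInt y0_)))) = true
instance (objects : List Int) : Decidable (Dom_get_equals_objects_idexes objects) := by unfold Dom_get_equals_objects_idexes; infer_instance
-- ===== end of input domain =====

-- B replaces A's quadratic per-element rescan by one dict-grouping pass over enumerate
-- plus one sort; duplicate-group removal disappears (the dict holds each group once).

-- ===== PORT A =====
-- [i for i,v in enumerate(objects) if v==o]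
def pvGroupA (objects : List Int) (o : Int) : List Int :=
  ((PySem.List.enumerate objects 0).filter (fun p => p.2 == o)).map (fun p => p.1)

-- list(num for num,_ in itertools.groupby(l)) on an explicit list: first key of each
-- run of adjacent equal elements (exact for groupby over a list of comparable values)
def pvGroupbyKeys : List (List Int) → List (List Int)
  | [] => []
  | [x] => [x]
  | x :: y :: t =>
      if x = y then pvGroupbyKeys (y :: t) else x :: pvGroupbyKeys (y :: t)

def get_equals_objects_idexes (objects : List Int) : List (List Int) :=
  let equal_indexes := objects.map (fun o => pvGroupA objects o)
  let equal_indexes := equal_indexes.filter (fun l => decide (1 < l.length))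
  let sortedIdx := PySem.List.sorted equal_indexes (fun x => x)
  pvGroupbyKeys sortedIdx

-- ===== PORT B =====
def get_equals_objects_idexes_alt (objects : List Int) : List (List Int) :=
  let d := (PySem.List.enumerate objects 0).foldl
             (fun d p => d.modify p.2 [] (fun g => g ++ [p.1])) PySem.Dict.empty
  PySem.List.sorted (d.values.filter (fun g => decide (1 < g.length))) (fun x => x)

-- ===== PRECONDITION & SPEC =====
def Spec_get_equals_objects_idexes (objects : List Int) (out : List (List Int)) : Prop := out = get_equals_objects_idexes_alt objects
instance (objects : List Int) (out : List (List Int)) : Decidable (Spec_get_equals_objects_idexes objects out) := by unfold Spec_get_equals_objects_idexes; infer_instance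

-- ===== CLAIM (what is proved, stated in full; the proofs are below) =====
def Claim_equal_get_equals_objects_idexes : Prop := ∀ (objects : List Int), Dom_get_equals_objects_idexes objects → Spec_get_equals_objects_idexes objects (get_equals_objects_idexes objects)

-- ===== LEMMAS AND PROOFS =====

-- the elaborator's DecidableLT (List Int) instance coincides with the LinearOrder one
theorem pvInstEq : (fun (a b : List Int) => a.decidableLT b) = (LinearOrder.toDecidableLT : DecidableLT (List Int)) := by
  funext a b; exact Subsingleton.elim _ _

-- the ORDER lemmas of PySem, restated at the instance the ports elaborate with
theorem pv_sorted_pairwise (xs : List (List Int)) :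
    (PySem.List.sorted xs (fun x => x)).Pairwise (· ≤ ·) := by
  rw [pvInstEq]; exact PySem.List.sorted_pairwise xs (fun x => x)

theorem pv_sorted_eq (xs ys : List (List Int)) (hp : ys.Perm xs) (hlt : ys.Pairwise (· < ·)) :
    PySem.List.sorted xs (fun x => x) = ys := by
  rw [pvInstEq]; exact PySem.List.sorted_eq_of_perm_of_pairwise_lt xs ys (fun x => x) hp hlt

-- membership survives adjacent-duplicate removal
theorem pvGroupbyKeys_mem (l : List (List Int)) (a : List Int) :
    a ∈ pvGroupbyKeys l ↔ a ∈ l := by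
  induction l with
  | nil => simp [pvGroupbyKeys]
  | cons x t ih =>
      cases t with
      | nil => simp [pvGroupbyKeys]
      | cons y t' =>
          simp only [pvGroupbyKeys]
          split_ifs with h
          · subst h; rw [ih]; simp
          · simp only [List.mem_cons, ih]

-- on a ≤-sorted list, groupby keys are strictly increasing
theorem pvGroupbyKeys_pairwise (l : List (List Int))
    (h : l.Pairwise (· ≤ ·)) : (pvGroupbyKeys l).Pairwise (· < ·) := by
  induction l with
  | nil => simp [pvGroupbyKeys]
  | cons x t ih =>
      cases t with
      | nil => simp [pvGroupbyKeys]
      | cons y t' =>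
          rw [List.pairwise_cons] at h
          obtain ⟨hx, ht⟩ := h
          simp only [pvGroupbyKeys]
          split_ifs with hxy
          · exact ih ht
          · refine List.pairwise_cons.2 ⟨?_, ih ht⟩
            intro b hb
            rw [pvGroupbyKeys_mem] at hb
            have hxb : x ≤ b := hx b hb
            rcases List.mem_cons.1 hb with rfl | hb'
            · exact lt_of_le_of_ne hxb hxy
            · have hyb : y ≤ b := (List.pairwise_cons.1 ht).1 b hb'
              exact lt_of_lt_of_le (lt_of_le_of_ne (hx y (List.mem_cons_self)) hxy) hyb

-- if i is an index in pvGroupA objects v then objects[i] = v (so distinct values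
-- with nonempty groups have different groups)
theorem pvGroupA_mem (objects : List Int) (v : Int) (i : Int) :
    i ∈ pvGroupA objects v → ∃ (k : Nat) (h : k < objects.length), i = (k : Int) ∧ objects[k] = v := by
  intro hi
  simp only [pvGroupA, List.mem_map, List.mem_filter] at hi
  obtain ⟨p, ⟨hp, hpv⟩, hpi⟩ := hi
  rw [PySem.List.mem_enumerate_iff] at hp
  obtain ⟨k, hk, rfl⟩ := hp
  simp only [beq_iff_eq] at hpv
  exact ⟨k, hk, by simpa using hpi.symm, hpv⟩

theorem pvGroupA_injOn (objects : List Int) (v w : Int)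
    (hv : pvGroupA objects v ≠ []) (h : pvGroupA objects v = pvGroupA objects w) : v = w := by
  obtain ⟨i, hi⟩ := List.exists_mem_of_ne_nil _ hv
  obtain ⟨k, hk, hik, hkv⟩ := pvGroupA_mem objects v i hi
  have hi' : i ∈ pvGroupA objects w := h ▸ hi
  obtain ⟨k', hk', hik', hkw⟩ := pvGroupA_mem objects w i hi'
  have : k = k' := by omega
  subst this
  rw [← hkv, hkw]

-- B's dict maps each value to its group
theorem pvDict_getD (objects : List Int) (v : Int) :
    ((PySem.List.enumerate objects 0).foldl
      (fun d p => d.modify p.2 [] (fun g => g ++ [p.1])) PySem.Dict.empty).getD v []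
    = pvGroupA objects v := by
  have hmap : (PySem.List.enumerate objects 0).foldl
      (fun d p => d.modify p.2 [] (fun g => g ++ [p.1])) PySem.Dict.empty
      = ((PySem.List.enumerate objects 0).map (fun p => (p.2, p.1))).foldl
          (fun d p => d.modify p.1 [] (fun g => g ++ [p.2])) PySem.Dict.empty := by
    rw [List.foldl_map]
  rw [hmap, PySem.Dict.getD_foldl_modify_append, List.filter_map, List.map_map]
  simp [pvGroupA, Function.comp_def]

-- B's dict keys: the distinct values of objects, in first-occurrence order
theorem pvDict_keys (objects : List Int) :
    ((PySem.List.enumerate objects 0).foldl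
      (fun d p => d.modify p.2 [] (fun g => g ++ [p.1])) PySem.Dict.empty).keys
    = PySem.Set.ofList objects := by
  rw [PySem.Dict.keys_foldl_modify_key (PySem.List.enumerate objects 0) (fun p => p.2) []
        (fun _ p => fun g => g ++ [p.1]) PySem.Dict.empty]
  rw [PySem.Dict.keys_empty, PySem.List.map_snd_enumerate, PySem.Set.update_nil_left]

theorem pvDict_keys_nodup (objects : List Int) :
    ((PySem.List.enumerate objects 0).foldl
      (fun d p => d.modify p.2 [] (fun g => g ++ [p.1])) PySem.Dict.empty).keys.Nodup := by
  rw [pvDict_keys]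
  exact PySem.Set.nodup_ofList objects

-- ===== VERDICT (by name: the statement is the Claim_ definition above) =====
theorem get_equals_objects_idexes_spec : Claim_equal_get_equals_objects_idexes := by
  intro objects _
  unfold Spec_get_equals_objects_idexes get_equals_objects_idexes get_equals_objects_idexes_alt
  set d := (PySem.List.enumerate objects 0).foldl
      (fun d p => d.modify p.2 [] (fun g => g ++ [p.1])) PySem.Dict.empty with hd
  -- B's filtered values list
  have hvals : d.values = (PySem.Set.ofList objects).map (fun v => pvGroupA objects v) := by
    rw [PySem.Dict.values_eq_map_keys d (pvDict_keys_nodup objects) [], pvDict_keys]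
    exact List.map_congr_left (fun v _ => pvDict_getD objects v)
  set P : List Int → Bool := fun l => decide (1 < l.length) with hP
  set gsA := (objects.map (fun o => pvGroupA objects o)).filter P with hgsA
  set ys := pvGroupbyKeys (PySem.List.sorted gsA (fun x => x)) with hys
  have hmemA : ∀ a, a ∈ ys ↔ a ∈ gsA := by
    intro a
    rw [hys, pvGroupbyKeys_mem, PySem.List.mem_sorted]
  have hgsB : d.values.filter P = ((PySem.Set.ofList objects).filter (fun v => P (pvGroupA objects v))).map (fun v => pvGroupA objects v) := by
    rw [hvals, List.filter_map]; rfl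
  -- ys is strictly increasing
  have hlt : ys.Pairwise (· < ·) :=
    pvGroupbyKeys_pairwise _ (pv_sorted_pairwise gsA)
  -- ys is a permutation of B's filtered values list
  have hnodupB : (d.values.filter P).Nodup := by
    rw [hgsB]
    refine List.Nodup.map_on ?_ ((PySem.Set.nodup_ofList objects).filter _)
    intro v hv w hw hvw
    refine pvGroupA_injOn objects v w ?_ hvw
    have : P (pvGroupA objects v) = true := (List.mem_filter.1 hv).2
    intro hnil
    rw [hnil] at this
    simp [hP] at this
  have hmemB : ∀ a, a ∈ d.values.filter P ↔ a ∈ gsA := by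
    intro a
    rw [hgsB, hgsA, List.filter_map]
    simp only [List.mem_map, List.mem_filter, Function.comp, PySem.Set.mem_ofList]
  have hperm : ys.Perm (d.values.filter P) := by
    refine (List.perm_ext_iff_of_nodup ((hlt.imp (fun h => ne_of_lt h)) : ys.Nodup) hnodupB).2 ?_
    intro a
    rw [hmemA, hmemB]
  exact (pv_sorted_eq (d.values.filter P) ys hperm hlt).symm
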